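-- pv_equiv track=rewrite | github.com/GrayXu/docx-doc-helper | replace_by_csv.py | is_sec_pattern
-- ===== SOURCE A (Python) =====
-- def is_sec_pattern(ori):
--     '''
--     A string is in section title pattern
--     '''
--     ori = ori.strip()
--     if len(ori) != 0 and ori[0].isdigit():  # first char is a digit
--         for char in ori[1:]:
--             if char == '.':
--                 return True
--             elif char.isdigit():
--                 continue
--             else:
--                 break
--     return False
-- ===== SOURCE B (Python) =====
-- import re
--
-- _SEC_RE = re.compile(r'\d+\.')
--
-- def is_sec_pattern(ori):
--     return bool(_SEC_RE.match(ori.strip()))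
-- ===== Notes on version B (the rewrite author's own statement) =====
-- stated objective: idiomatic
-- what changed: Replaced the manual first-char test plus character-by-character scan loop with a single precompiled regular-expression prefix match r'\d+\.' on the stripped string.
import Mathlib
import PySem

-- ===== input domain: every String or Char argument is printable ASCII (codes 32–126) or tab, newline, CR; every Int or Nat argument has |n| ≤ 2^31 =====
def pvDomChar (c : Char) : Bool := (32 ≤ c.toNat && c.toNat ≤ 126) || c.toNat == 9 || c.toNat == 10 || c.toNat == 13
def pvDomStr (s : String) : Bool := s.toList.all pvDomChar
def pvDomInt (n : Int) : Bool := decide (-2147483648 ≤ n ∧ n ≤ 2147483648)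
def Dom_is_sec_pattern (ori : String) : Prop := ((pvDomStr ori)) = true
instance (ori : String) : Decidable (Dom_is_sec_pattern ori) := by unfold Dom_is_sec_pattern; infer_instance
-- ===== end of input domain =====

-- B replaces A's manual first-char test and scan loop by a regex prefix match r'\d+\.'
-- on the stripped string (objective: idiomatic). Return values agree on all inputs.

-- ===== PORT A =====
-- the for-loop over ori[1:]: '.' returns True, a digit continues, anything else breaks (→ False)
def secLoop : List Char → Bool
  | [] => false
  | c :: rest =>
      if c = '.' then true
      else if PySem.Chars.isdigit c then secLoop rest
      else false

def is_sec_pattern (ori : String) : Bool :=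
  match PySem.Chars.strip ori.toList with
  | [] => false
  | c :: rest => if PySem.Chars.isdigit c then secLoop rest else false

-- ===== PORT B =====
-- Source B tests re.match(r'\d+\.', ori.strip()): a nonempty leading digit run
-- immediately followed by a literal '.'. The regex-library call is ported as
-- exactly that prefix condition (takeWhile/dropWhile on the digit predicate).
def is_sec_pattern_alt (ori : String) : Bool :=
  let cs := PySem.Chars.strip ori.toList
  decide (cs.takeWhile PySem.Chars.isdigit ≠ []) &&
    ((cs.dropWhile PySem.Chars.isdigit).head? == some '.')

-- ===== PRECONDITION & SPEC =====
def Spec_is_sec_pattern (ori : String) (out : Bool) : Prop := out = is_sec_pattern_alt ori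
instance (ori : String) (out : Bool) : Decidable (Spec_is_sec_pattern ori out) := by unfold Spec_is_sec_pattern; infer_instance

-- ===== CLAIM (what is proved, stated in full; the proofs are below) =====
def Claim_equal_is_sec_pattern : Prop := ∀ (ori : String), Dom_is_sec_pattern ori → Spec_is_sec_pattern ori (is_sec_pattern ori)

-- ===== LEMMAS AND PROOFS =====
theorem secLoop_eq (l : List Char) :
    secLoop l = ((l.dropWhile PySem.Chars.isdigit).head? == some '.') := by
  induction l with
  | nil => simp [secLoop]
  | cons c rest ih =>
      by_cases hdot : c = '.'
      · subst hdot
        have : PySem.Chars.isdigit '.' = false := by decide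
        simp [secLoop, List.dropWhile, this]
      · by_cases hd : PySem.Chars.isdigit c
        · simp [secLoop, hdot, hd, List.dropWhile, ih]
        · have hne : (some c == some '.') = false := by
            simpa [beq_iff_eq] using hdot
          simp [secLoop, if_neg hdot, hd, List.dropWhile, List.head?, hne]

-- ===== VERDICT (by name: the statement is the Claim_ definition above) =====
theorem is_sec_pattern_spec : Claim_equal_is_sec_pattern := by
  intro ori _
  unfold Spec_is_sec_pattern is_sec_pattern is_sec_pattern_alt
  cases h : PySem.Chars.strip ori.toList with
  | nil => simp
  | cons c rest =>
      by_cases hd : PySem.Chars.isdigit c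
      · simp [hd, List.takeWhile, List.dropWhile, secLoop_eq]
      · simp only [List.takeWhile, List.dropWhile, hd]
        simp
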